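-- pv_equiv track=rewrite | github.com/bakkerjangert/AoC_2022 | Day 16/Day 16.py | remaining_score_pt2
-- ===== SOURCE A (Python) =====
-- def remaining_score_pt2(minute, flow_rates):
--     new_score = 0
--     flow_rates = sorted(list(flow_rates))
--     while len(flow_rates) > 0:
--         new_score += flow_rates.pop(0) * max(minute, 0)
--         if len(flow_rates) > 0:
--             new_score += flow_rates.pop(0) * max(minute, 0)
--         minute -= 2  # Do a step and open
--     return new_score
-- ===== SOURCE B (Python) =====
-- def remaining_score_pt2(minute, flow_rates):
--     total = 0
--     fr = sorted(flow_rates)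
--     for i, r in enumerate(fr):
--         m = minute - 2 * (i // 2)
--         if m <= 0:
--             break
--         total += r * m
--     return total
-- ===== Notes on version B (the rewrite author's own statement) =====
-- stated objective: faster
-- what changed: Replaces the destructive pair-popping loop (pop(0) is O(n) each) with a single indexed pass over the sorted list computing each multiplier as minute - 2*(i//2) and breaking early once the multiplier is non-positive.
import Mathlib
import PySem

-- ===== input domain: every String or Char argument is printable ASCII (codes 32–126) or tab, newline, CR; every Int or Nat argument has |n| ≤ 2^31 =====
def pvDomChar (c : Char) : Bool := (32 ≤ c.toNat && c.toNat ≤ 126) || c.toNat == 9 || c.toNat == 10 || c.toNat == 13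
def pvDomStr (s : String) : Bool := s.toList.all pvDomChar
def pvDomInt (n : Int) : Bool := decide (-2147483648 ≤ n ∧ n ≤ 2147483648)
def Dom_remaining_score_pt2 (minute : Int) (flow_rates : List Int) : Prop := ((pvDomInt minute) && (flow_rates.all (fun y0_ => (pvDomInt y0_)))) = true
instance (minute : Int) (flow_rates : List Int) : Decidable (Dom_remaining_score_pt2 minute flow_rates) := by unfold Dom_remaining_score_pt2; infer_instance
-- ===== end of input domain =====

-- B replaces A's destructive pair-popping loop by one indexed pass with an early break (faster).

-- ===== PORT A =====
-- the while loop of A: pop up to two elements, each weighted by max(minute, 0), then minute -= 2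
def pvLoopA : List Int → Int → Int
  | [], _ => 0
  | [a], minute => a * max minute 0
  | a :: b :: rest, minute => a * max minute 0 + b * max minute 0 + pvLoopA rest (minute - 2)

def remaining_score_pt2 (minute : Int) (flow_rates : List Int) : Int :=
  pvLoopA (PySem.List.sorted flow_rates (fun x => x) false) minute

-- ===== PORT B =====
-- B's for loop over enumerate(sorted(fr)) with index i, breaking once the multiplier is ≤ 0
def pvLoopB (minute : Int) : List Int → Nat → Int
  | [], _ => 0
  | r :: rest, i =>
      let m := minute - 2 * ((i / 2 : Nat) : Int)
      if m ≤ 0 then 0 else r * m + pvLoopB minute rest (i + 1)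

def remaining_score_pt2_alt (minute : Int) (flow_rates : List Int) : Int :=
  pvLoopB minute (PySem.List.sorted flow_rates (fun x => x) false) 0

-- ===== PRECONDITION & SPEC =====
def Spec_remaining_score_pt2 (minute : Int) (flow_rates : List Int) (out : Int) : Prop := out = remaining_score_pt2_alt minute flow_rates
instance (minute : Int) (flow_rates : List Int) (out : Int) : Decidable (Spec_remaining_score_pt2 minute flow_rates out) := by unfold Spec_remaining_score_pt2; infer_instance

-- ===== CLAIM (what is proved, stated in full; the proofs are below) =====
def Claim_equal_remaining_score_pt2 : Prop := ∀ (minute : Int) (flow_rates : List Int), Dom_remaining_score_pt2 minute flow_rates → Spec_remaining_score_pt2 minute flow_rates (remaining_score_pt2 minute flow_rates)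

-- ===== LEMMAS AND PROOFS =====

theorem pvLoopA_nonpos : ∀ (l : List Int) (m : Int), m ≤ 0 → pvLoopA l m = 0
  | [], _, _ => rfl
  | [a], m, h => by simp [pvLoopA, max_eq_right h]
  | a :: b :: rest, m, h => by
      have := pvLoopA_nonpos rest (m - 2) (by omega)
      simp [pvLoopA, max_eq_right h, this]

theorem pvLoopB_eq_pvLoopA :
    ∀ (l : List Int) (minute : Int) (k : Nat),
      pvLoopB minute l (2 * k) = pvLoopA l (minute - 2 * k)
  | [], _, _ => rfl
  | [a], minute, k => by
      simp only [pvLoopB, pvLoopA]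
      rw [Nat.mul_div_cancel_left k (by norm_num)]
      by_cases h : minute - 2 * k ≤ 0
      · rw [if_pos h, max_eq_right h, mul_zero]
      · rw [if_neg h, max_eq_left (by omega : (0:Int) ≤ minute - 2 * k)]
        ring
  | a :: b :: rest, minute, k => by
      have ih := pvLoopB_eq_pvLoopA rest minute (k + 1)
      simp only [pvLoopB, pvLoopA]
      rw [Nat.mul_div_cancel_left k (by norm_num)]
      have h2 : (2 * k + 1) / 2 = k := by omega
      rw [h2]
      by_cases h : minute - 2 * k ≤ 0
      · simp only [h, if_true]
        rw [max_eq_right h, pvLoopA_nonpos rest (minute - 2 * k - 2) (by omega)]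
        ring
      · simp only [h, if_false]
        have : 2 * (k + 1) = 2 * k + 1 + 1 := by omega
        rw [← this, ih, max_eq_left (by omega : (0:Int) ≤ minute - 2 * k)]
        have : minute - 2 * ((k : Int) + 1) = minute - 2 * k - 2 := by ring
        push_cast at this ⊢
        rw [this]
        ring

-- ===== VERDICT (by name: the statement is the Claim_ definition above) =====
theorem remaining_score_pt2_spec : Claim_equal_remaining_score_pt2 := by
  intro minute flow_rates _
  unfold Spec_remaining_score_pt2 remaining_score_pt2 remaining_score_pt2_alt
  have := pvLoopB_eq_pvLoopA (PySem.List.sorted flow_rates (fun x => x) false) minute 0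
  simpa using this.symm
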